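-- pv_equiv track=rewrite | github.com/iyioon/NYPC-Yacht-Auction | yacht/agents/agent.py | _compute_leftover
-- ===== SOURCE A (Python) =====
-- from typing import List, Optional, Tuple
--
-- def _compute_leftover(pool: List[int], subset: List[int]) -> List[int]:
--     """Return the dice in `pool` not selected in `subset`.  Multiset subtraction."""
--     # Work on multisets: for each die in subset, remove one occurrence from pool copy
--     pool_copy = list(pool)
--     for d in subset:
--         try:
--             pool_copy.remove(d)
--         except ValueError:
--             # This should not happen; ignore gracefully
--             continue
--     return pool_copy
-- ===== SOURCE B (Python) =====
-- from typing import List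
--
-- def _compute_leftover(pool: List[int], subset: List[int]) -> List[int]:
--     # Count how many of each value must be dropped, then one pass over pool.
--     need = {}
--     for d in subset:
--         need[d] = need.get(d, 0) + 1
--     leftover = []
--     for x in pool:
--         if need.get(x, 0) > 0:
--             need[x] = need[x] - 1
--         else:
--             leftover.append(x)
--     return leftover
-- ===== Notes on version B (the rewrite author's own statement) =====
-- stated objective: faster
-- what changed: Instead of looping over subset and calling list.remove (a linear scan each time), B builds a dict of needed counts from subset once and makes a single pass over pool, skipping an element while its remaining count is positive.
import Mathlib
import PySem

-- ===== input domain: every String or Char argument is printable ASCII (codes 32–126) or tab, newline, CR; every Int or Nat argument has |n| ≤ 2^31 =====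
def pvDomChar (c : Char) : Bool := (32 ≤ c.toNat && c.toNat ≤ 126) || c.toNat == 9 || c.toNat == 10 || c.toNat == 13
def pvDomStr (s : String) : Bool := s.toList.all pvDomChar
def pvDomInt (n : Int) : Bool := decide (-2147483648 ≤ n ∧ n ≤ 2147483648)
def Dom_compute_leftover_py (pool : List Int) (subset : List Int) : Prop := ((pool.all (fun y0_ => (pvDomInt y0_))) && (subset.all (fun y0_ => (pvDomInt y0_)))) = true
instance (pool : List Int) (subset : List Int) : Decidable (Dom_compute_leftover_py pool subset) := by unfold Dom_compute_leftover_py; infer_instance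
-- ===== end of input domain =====

-- B replaces A's repeated list.remove scans with a count dict of subset and one pass over pool (faster).


-- ===== PORT A =====
-- for d in subset: try pool_copy.remove(d) except ValueError: continue
def compute_leftover_py (pool : List Int) (subset : List Int) : List Int :=
  subset.foldl (fun pc d =>
    match PySem.List.remove? pc d with
    | some pc' => pc'
    | none => pc) pool

-- ===== PORT B =====
def compute_leftover_py_alt (pool : List Int) (subset : List Int) : List Int :=
  let need : PySem.Dict Int Int :=
    subset.foldl (fun d x => d.insert x (d.getD x 0 + 1)) PySem.Dict.empty
  (pool.foldl (fun (st : List Int × PySem.Dict Int Int) x =>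
      if 0 < st.2.getD x 0 then (st.1, st.2.insert x (st.2.getD x 0 - 1))
      else (st.1 ++ [x], st.2)) (([] : List Int), need)).1

-- ===== PRECONDITION & SPEC =====
def Spec_compute_leftover_py (pool : List Int) (subset : List Int) (out : List Int) : Prop := out = compute_leftover_py_alt pool subset
instance (pool : List Int) (subset : List Int) (out : List Int) : Decidable (Spec_compute_leftover_py pool subset out) := by unfold Spec_compute_leftover_py; infer_instance

-- ===== CLAIM (what is proved, stated in full; the proofs are below) =====
def Claim_equal_compute_leftover_py : Prop := ∀ (pool : List Int) (subset : List Int), Dom_compute_leftover_py pool subset → Spec_compute_leftover_py pool subset (compute_leftover_py pool subset)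

-- ===== LEMMAS AND PROOFS =====

-- abstract model of B's pool pass: c gives the remaining count of each value
def pvSkip (p : List Int) (c : Int → Int) : List Int :=
  match p with
  | [] => []
  | x :: xs => if 0 < c x then pvSkip xs (Function.update c x (c x - 1)) else x :: pvSkip xs c

theorem pvSkip_congr (p : List Int) (c c' : Int → Int) (h : ∀ v, c v = c' v) :
    pvSkip p c = pvSkip p c' := by
  have : c = c' := funext h
  rw [this]

theorem pvSkip_zero (p : List Int) (c : Int → Int) (h : ∀ v, c v ≤ 0) :
    pvSkip p c = p := by
  induction p with
  | nil => rfl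
  | cons x xs ih =>
    simp only [pvSkip]
    rw [if_neg (by have := h x; omega)]
    rw [ih]

-- key lemma: bumping d's count by one = deleting the first d from the pool
theorem pvSkip_bump (p : List Int) (c : Int → Int) (d : Int) (hc : ∀ v, 0 ≤ c v) :
    pvSkip p (Function.update c d (c d + 1)) = pvSkip (p.erase d) c := by
  induction p generalizing c with
  | nil => rfl
  | cons x xs ih =>
    by_cases hxd : x = d
    · subst hxd
      simp only [pvSkip, List.erase_cons_head]
      rw [if_pos (by simp [Function.update]; have := hc x; omega)]
      rw [pvSkip_congr xs _ c]
      intro v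
      by_cases hv : v = x <;> simp [Function.update, hv]
    · rw [List.erase_cons_tail (by simp [hxd])]
      simp only [pvSkip]
      have hx : Function.update c d (c d + 1) x = c x := by
        simp [Function.update, hxd]
      rw [hx]
      by_cases hcx : 0 < c x
      · rw [if_pos hcx, if_pos hcx]
        rw [Function.update_comm (Ne.symm hxd) (c d + 1) (c x - 1) c]
        rw [show c d = Function.update c x (c x - 1) d from
              (Function.update_of_ne (Ne.symm hxd) _ _).symm]
        exact ih (Function.update c x (c x - 1))
          (by intro v
              by_cases hv : v = x
              · subst hv; simp [Function.update]; omega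
              · simp [Function.update, hv]; exact hc v)
      · rw [if_neg hcx, if_neg hcx]
        rw [ih c hc]

-- A's step equals List.erase (remove of an absent value is a no-op, and erase too)
theorem pvStepA_eq_erase (pc : List Int) (d : Int) :
    (match PySem.List.remove? pc d with
     | some pc' => pc'
     | none => pc) = pc.erase d := by
  by_cases h : d ∈ pc
  · rw [PySem.List.remove?_eq_some_erase pc d h]
  · rw [(PySem.List.remove?_eq_none_iff pc d).mpr h, List.erase_of_not_mem h]

-- A equals the abstract model driven by subset's counts
theorem pvA_eq_skip (subset pool : List Int) :
    compute_leftover_py pool subset = pvSkip pool (fun v => (subset.count v : Int)) := by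
  induction subset generalizing pool with
  | nil =>
    simp only [compute_leftover_py, List.foldl_nil]
    rw [pvSkip_zero pool _ (by intro v; simp)]
  | cons d ds ih =>
    simp only [compute_leftover_py, List.foldl_cons] at *
    rw [ih (match PySem.List.remove? pool d with
            | some pc' => pc'
            | none => pool)]
    rw [pvStepA_eq_erase]
    rw [← pvSkip_bump pool _ d (by intro v; simp)]
    apply pvSkip_congr
    intro v
    by_cases hv : v = d
    · subst hv; simp [Function.update]
    · simp [Function.update, hv, Ne.symm hv]

-- B's fold over pool equals the abstract model (with an accumulator)
theorem pvB_fold (p : List Int) (acc : List Int) (d : PySem.Dict Int Int) :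
    (p.foldl (fun (st : List Int × PySem.Dict Int Int) x =>
      if 0 < st.2.getD x 0 then (st.1, st.2.insert x (st.2.getD x 0 - 1))
      else (st.1 ++ [x], st.2)) (acc, d)).1 = acc ++ pvSkip p (fun v => d.getD v 0) := by
  induction p generalizing acc d with
  | nil => simp [pvSkip]
  | cons x xs ih =>
    simp only [List.foldl_cons, pvSkip]
    by_cases hx : 0 < d.getD x 0
    · rw [if_pos hx, if_pos hx]
      rw [ih acc (d.insert x (d.getD x 0 - 1))]
      congr 1
      apply pvSkip_congr
      intro v
      by_cases hv : v = x <;>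
        simp [PySem.Dict.getD_insert, Function.update, hv]
    · rw [if_neg hx, if_neg hx]
      rw [ih (acc ++ [x]) d]
      simp

-- ===== VERDICT (by name: the statement is the Claim_ definition above) =====
theorem compute_leftover_py_spec : Claim_equal_compute_leftover_py := by
  intro pool subset _
  unfold Spec_compute_leftover_py compute_leftover_py_alt
  rw [pvB_fold pool []
      (subset.foldl (fun d x => d.insert x (d.getD x 0 + 1)) PySem.Dict.empty)]
  rw [List.nil_append]
  rw [pvA_eq_skip subset pool]
  apply pvSkip_congr
  intro v
  rw [PySem.Dict.foldl_insert_getD_add_one_eq_counter, PySem.Dict.getD_counter]
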